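-- pv_equiv track=rewrite | github.com/EmanuellyFreire/ImplementacaoAlgoritmoGrafo | AtividadeGrafoCaminhoProfundidadeCiclo.py | caminho_all_vertices
-- ===== SOURCE A (Python) =====
-- def vizinhos(vertices, arestas, vertice):
--   if vertice not in vertices:
--     return []
--
--   return [dest for (orig, dest) in arestas if orig == vertice]
--
-- def caminho_all_vertices(vertices, arestas):
--   if not vertices:
--     return []
--
--   fila = [] # fila
-- # 1. insere o vertice inicial na fila
--   fila.append(vertices[0])
-- # 2. inicia a lista de visitados vazia
--   visitados = []
-- # 3. enquanto a fila não estiver vazia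
--   while fila:
--   # a. retira o 1 vertice da fila
--     vertice = fila.pop(0)
--   # b. verifica se o vertice já foi visitado
--     if vertice not in visitados:
--   # b. manca vértice como visitado
--       visitados.append(vertice)
--
--   # c. obtem vizinhos do vértice
--       vizinhos_vertice = vizinhos(vertices, arestas, vertice)
--   # d. para cada vizinho:
--       for vizinho in vizinhos_vertice:
--         # i. verifica se o vizinho não esta na fila
--         # ii. verifica se o vizinho já não foi vizitado
--         if vizinho not in fila and vizinho not in visitados:
--     # iii. caso não esteja na fila e não tenha sido visitado, adiciona o vizinho na fila
--           fila.append(vizinho)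
-- # 4. retorna os visitados
--   return visitados
-- ===== SOURCE B (Python) =====
-- def caminho_all_vertices(vertices, arestas):
--     if not vertices:
--         return []
--     adj = {v: [dest for (orig, dest) in arestas if orig == v] for v in vertices}
--     visitados = []
--     frontier = [vertices[0]]
--     while frontier:
--         next_frontier = []
--         for v in frontier:
--             if v in visitados:
--                 continue
--             visitados.append(v)
--             for dest in adj.get(v, []):
--                 if dest not in visitados and dest not in next_frontier:
--                     next_frontier.append(dest)
--         frontier = next_frontier
--     return visitados
-- ===== Notes on version B (the rewrite author's own statement) =====
-- stated objective: alternative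
-- what changed: Replaced A's single mutable FIFO queue with pop(0) and per-dequeue edge scans by a precomputed adjacency dict plus a level-synchronous BFS that processes whole frontiers (skipping already-visited nodes) and builds each next frontier deduplicated against visited and itself.
import Mathlib
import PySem

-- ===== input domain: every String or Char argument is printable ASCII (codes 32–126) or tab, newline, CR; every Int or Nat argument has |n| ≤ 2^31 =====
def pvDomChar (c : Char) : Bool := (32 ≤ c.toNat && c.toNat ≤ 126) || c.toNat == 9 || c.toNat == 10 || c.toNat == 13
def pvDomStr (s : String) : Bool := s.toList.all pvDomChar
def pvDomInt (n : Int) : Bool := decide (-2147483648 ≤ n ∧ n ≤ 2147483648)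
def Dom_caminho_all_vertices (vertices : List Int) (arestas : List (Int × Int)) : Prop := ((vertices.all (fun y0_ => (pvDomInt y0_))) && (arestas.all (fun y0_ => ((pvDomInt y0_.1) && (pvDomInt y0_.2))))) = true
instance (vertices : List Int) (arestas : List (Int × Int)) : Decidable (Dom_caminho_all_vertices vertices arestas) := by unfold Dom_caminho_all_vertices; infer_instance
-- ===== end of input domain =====

-- B replaces A's mutable FIFO queue (pop(0) + per-dequeue edge scan) by a precomputed
-- adjacency dict and a level-synchronous BFS over whole frontiers; same return value.

-- ===== PORT A =====
-- helper `vizinhos` of A, literal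
def vizinhosA (vertices : List Int) (arestas : List (Int × Int)) (vertice : Int) : List Int :=
  if ¬ vertices.contains vertice then []
  else (arestas.filter (fun p => p.1 == vertice)).map Prod.snd

-- A's `while fila:` loop; `fuel` only makes the same computation total (one unit per dequeue)
def loopA (vertices : List Int) (arestas : List (Int × Int)) :
    Nat → List Int → List Int → List Int
  | 0, _, visitados => visitados
  | _ + 1, [], visitados => visitados
  | f + 1, vertice :: fila, visitados =>
    if visitados.contains vertice then
      loopA vertices arestas f fila visitados
    else
      let visitados' := visitados ++ [vertice]
      let viz := vizinhosA vertices arestas vertice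
      let fila' := viz.foldl
        (fun q vizinho =>
          if ¬ q.contains vizinho ∧ ¬ visitados'.contains vizinho then q ++ [vizinho] else q)
        fila
      loopA vertices arestas f fila' visitados'

def caminho_all_vertices (vertices : List Int) (arestas : List (Int × Int)) : List Int :=
  match vertices with
  | [] => []
  | v0 :: _ =>
    loopA vertices arestas (arestas.length + vertices.length + 1) [v0] []

-- ===== PORT B =====
-- B's adjacency dict comprehension `{v: [dest for (orig, dest) in arestas if orig == v] for v in vertices}`
def buildAdjB (vertices : List Int) (arestas : List (Int × Int)) : PySem.Dict Int (List Int) :=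
  vertices.foldl
    (fun d v => d.insert v ((arestas.filter (fun p => p.1 == v)).map Prod.snd))
    PySem.Dict.empty

-- B's `while frontier:` with inner `for v in frontier:`; state = (remaining frontier, next frontier,
-- visitados); `fuel` only makes the same computation total (one unit per frontier element)
def loopB (adj : PySem.Dict Int (List Int)) :
    Nat → List Int → List Int → List Int → List Int
  | 0, _, _, visitados => visitados
  | _ + 1, [], [], visitados => visitados
  | f + 1, [], nv :: nextFrontier, visitados =>
    loopB adj (f + 1) (nv :: nextFrontier) [] visitados
  | f + 1, v :: rest, nextFrontier, visitados =>
    if visitados.contains v then loopB adj f rest nextFrontier visitados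
    else
      let visitados' := visitados ++ [v]
      let nextFrontier' := (adj.getD v []).foldl
        (fun acc dest =>
          if ¬ visitados'.contains dest ∧ ¬ acc.contains dest then acc ++ [dest] else acc)
        nextFrontier
      loopB adj f rest nextFrontier' visitados'
  termination_by f _ nextFrontier _ => (f, nextFrontier.length)

def caminho_all_vertices_alt (vertices : List Int) (arestas : List (Int × Int)) : List Int :=
  match vertices with
  | [] => []
  | v0 :: _ =>
    loopB (buildAdjB vertices arestas)
      ((arestas.length + 1) * (arestas.length + 1) + vertices.length + 1) [v0] [] []

-- ===== PRECONDITION & SPEC =====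
def Spec_caminho_all_vertices (vertices : List Int) (arestas : List (Int × Int)) (out : List Int) : Prop := out = caminho_all_vertices_alt vertices arestas
instance (vertices : List Int) (arestas : List (Int × Int)) (out : List Int) : Decidable (Spec_caminho_all_vertices vertices arestas out) := by unfold Spec_caminho_all_vertices; infer_instance

-- ===== CLAIM (what is proved, stated in full; the proofs are below) =====
def Claim_equal_caminho_all_vertices : Prop := ∀ (vertices : List Int) (arestas : List (Int × Int)), Dom_caminho_all_vertices vertices arestas → Spec_caminho_all_vertices vertices arestas (caminho_all_vertices vertices arestas)

-- ===== LEMMAS AND PROOFS =====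

-- first-occurrence dedup: the shape A's queue always has (B's frontiers, filtered and dedup'd)
def dedupF : List Int → List Int
  | [] => []
  | a :: l => a :: dedupF (l.filter (fun x => x ≠ a))
  termination_by l => l.length
  decreasing_by simp only [List.length_unattach]; exact Nat.lt_succ_of_le (le_trans (List.length_filter_le _ _) (by simp))

theorem unatt (l : List Int) (a : Int) :
    (List.filter (fun x => (fun y => decide (y ≠ a)) x.1) l.attach).unattach = l.filter (fun x => x ≠ a) := by
  rw [List.unattach_filter (g := fun y => decide (y ≠ a)) (hf := fun x h => rfl), List.unattach_attach]

theorem mem_dedupF (x : Int) : ∀ l : List Int, x ∈ dedupF l ↔ x ∈ l := by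
  intro l
  induction l using dedupF.induct with
  | case1 => simp [dedupF]
  | case2 a l ih =>
    rw [unatt] at ih
    rw [dedupF]
    by_cases hx : x = a
    · simp [hx]
    · simp only [List.mem_cons, hx, false_or, ih, List.mem_filter]
      simp [hx]

theorem dedupF_append_mem (a : Int) : ∀ l : List Int, a ∈ l → dedupF (l ++ [a]) = dedupF l := by
  intro l
  induction l using dedupF.induct with
  | case1 => simp
  | case2 b l ih =>
    rw [unatt] at ih
    intro ha
    rw [List.cons_append, dedupF, dedupF]
    by_cases hab : a = b
    · subst hab
      have : (l ++ [a]).filter (fun x => x ≠ a) = l.filter (fun x => x ≠ a) := by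
        simp [List.filter_append]
      rw [this]
    · have ha' : a ∈ l := by
        rcases List.mem_cons.mp ha with h | h
        · exact absurd h hab
        · exact h
      have : (l ++ [a]).filter (fun x => x ≠ b) = l.filter (fun x => x ≠ b) ++ [a] := by
        simp [List.filter_append, hab]
      rw [this, ih (by simp [List.mem_filter, ha', hab])]

theorem dedupF_append_not_mem (a : Int) : ∀ l : List Int, a ∉ l → dedupF (l ++ [a]) = dedupF l ++ [a] := by
  intro l
  induction l using dedupF.induct with
  | case1 => simp [dedupF]
  | case2 b l ih =>
    rw [unatt] at ih
    intro ha
    have hab : a ≠ b := by rintro rfl; simp at ha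
    have ha' : a ∉ l := fun h => ha (List.mem_cons.mpr (Or.inr h))
    rw [List.cons_append, dedupF, dedupF]
    have : (l ++ [a]).filter (fun x => x ≠ b) = l.filter (fun x => x ≠ b) ++ [a] := by
      simp [List.filter_append, hab]
    rw [this, ih (by simp [List.mem_filter]; intro h; exact absurd h ha')]
    simp

theorem nodup_dedupF : ∀ l : List Int, (dedupF l).Nodup := by
  intro l
  induction l using dedupF.induct with
  | case1 => simp [dedupF]
  | case2 a l ih =>
    rw [unatt] at ih
    rw [dedupF]
    refine List.nodup_cons.mpr ⟨?_, ih⟩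
    rw [mem_dedupF]
    simp [List.mem_filter]

theorem length_dedupF_le : ∀ l : List Int, (dedupF l).length ≤ l.length := by
  intro l
  induction l using dedupF.induct with
  | case1 => simp [dedupF]
  | case2 a l ih =>
    rw [unatt] at ih
    rw [dedupF]
    simpa using Nat.add_le_add_right (le_trans ih (List.length_filter_le _ _)) 1

-- lookup in B's adjacency dict is A's `vizinhos`
theorem getD_foldl_insert (arestas : List (Int × Int)) (x : Int) :
    ∀ (vs : List Int) (d : PySem.Dict Int (List Int)),
      (vs.foldl (fun d v => d.insert v ((arestas.filter (fun p => p.1 == v)).map Prod.snd)) d).getD x []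
      = if x ∈ vs then (arestas.filter (fun p => p.1 == x)).map Prod.snd else d.getD x [] := by
  intro vs
  induction vs with
  | nil => intro d; simp
  | cons v vs ih =>
    intro d
    rw [List.foldl_cons, ih]
    by_cases hx : x ∈ vs
    · simp [hx]
    · by_cases hxv : x = v
      · subst hxv; simp [hx, PySem.Dict.getD_insert_self]
      · simp [hx, hxv, PySem.Dict.getD_insert]

theorem getD_buildAdjB (vertices : List Int) (arestas : List (Int × Int)) (v : Int) :
    (buildAdjB vertices arestas).getD v [] = vizinhosA vertices arestas v := by
  rw [buildAdjB, getD_foldl_insert, vizinhosA]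
  by_cases hv : v ∈ vertices <;> simp [hv]

-- number of distinct not-yet-visited vertices among S (a bound on A's remaining pops)
def unvis (S vis : List Int) : Nat := ((dedupF S).filter (fun x => !vis.contains x)).length

theorem filter_contains_append (vis : List Int) (v : Int) (l : List Int) :
    l.filter (fun x => !(vis ++ [v]).contains x)
      = (l.filter (fun x => !vis.contains x)).filter (fun x => x ≠ v) := by
  rw [List.filter_filter]
  apply List.filter_congr
  intro x _
  by_cases h1 : x ∈ vis <;> by_cases h2 : x = v <;> simp [h1, h2]

theorem unvis_decrease (S vis : List Int) (v : Int) (hS : v ∈ S) (hv : vis.contains v = false) :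
    unvis S (vis ++ [v]) + 1 = unvis S vis := by
  unfold unvis
  rw [filter_contains_append]
  set m := (dedupF S).filter (fun x => !vis.contains x) with hm
  have hnd : m.Nodup := (nodup_dedupF S).filter _
  have hvm : v ∈ m := by
    rw [hm, List.mem_filter]
    exact ⟨(mem_dedupF v S).mpr hS, by simpa using hv⟩
  have h1 : m.filter (fun x => x ≠ v) = m.erase v := by
    rw [show (fun x : Int => decide (x ≠ v)) = (fun x : Int => x != v) from funext fun x => by by_cases h : x = v <;> simp [h, bne]]
    exact (List.Nodup.erase_eq_filter hnd v).symm
  rw [h1, List.length_erase_of_mem hvm]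
  have : 1 ≤ m.length := List.length_pos_of_mem hvm
  omega

-- A's inner enqueue fold over the neighbour list, started from the dedup'd queue,
-- equals the dedup'd queue of B's next-frontier fold
theorem fold_step (vis' r : List Int) : ∀ (viz next : List Int),
    viz.foldl
      (fun q d => if ¬ q.contains d ∧ ¬ vis'.contains d then q ++ [d] else q)
      (dedupF ((r ++ next).filter (fun x => !vis'.contains x)))
    = dedupF ((r ++ viz.foldl
        (fun acc d => if ¬ vis'.contains d ∧ ¬ acc.contains d then acc ++ [d] else acc)
        next).filter (fun x => !vis'.contains x)) := by
  intro viz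
  induction viz with
  | nil => intro next; rfl
  | cons d viz ih =>
    intro next
    simp only [List.foldl_cons]
    by_cases hdv : d ∈ vis'
    · have h1 : (vis'.contains d = true) := by simpa using hdv
      simp only [h1, not_true, and_false, if_false, ih]
      simp
    · have h1 : ¬ (vis'.contains d = true) := by simpa using hdv
      by_cases hdn : d ∈ next
      · -- already in B's next frontier, hence in A's queue: both skip
        have hq : (dedupF ((r ++ next).filter (fun x => !vis'.contains x))).contains d = true := by
          simp only [List.contains_eq_mem, decide_eq_true_eq, mem_dedupF, List.mem_filter]
          exact ⟨List.mem_append.mpr (Or.inr hdn), by simp [hdv]⟩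
        have hbn : (next.contains d = true) := by simpa using hdn
        simp only [hq, not_true, false_and, if_false, h1, hbn, and_false, if_false]
        exact ih next
      · have hbn : ¬ (next.contains d = true) := by simpa using hdn
        by_cases hdr : d ∈ r
        · -- d is still ahead in the current frontier: A sees it in the queue and skips,
          -- B adds a (deduplicated-away) copy to next
          have hq : (dedupF ((r ++ next).filter (fun x => !vis'.contains x))).contains d = true := by
            simp only [List.contains_eq_mem, decide_eq_true_eq, mem_dedupF, List.mem_filter]
            exact ⟨List.mem_append.mpr (Or.inl hdr), by simp [hdv]⟩
          rw [if_neg (fun h => h.1 hq), if_pos ⟨h1, hbn⟩]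
          have hrw : dedupF ((r ++ (next ++ [d])).filter (fun x => !vis'.contains x))
              = dedupF ((r ++ next).filter (fun x => !vis'.contains x)) := by
            rw [← List.append_assoc, List.filter_append (r ++ next)]
            have : [d].filter (fun x => !vis'.contains x) = [d] := by simp [hdv]
            rw [this, dedupF_append_mem]
            simp only [List.mem_filter, List.mem_append]
            exact ⟨Or.inl hdr, by simp [hdv]⟩
          rw [← hrw]
          exact ih (next ++ [d])
        · -- genuinely new: both append d
          have hq : ¬ ((dedupF ((r ++ next).filter (fun x => !vis'.contains x))).contains d = true) := by
            simp only [List.contains_eq_mem, decide_eq_true_eq, mem_dedupF, List.mem_filter]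
            rintro ⟨hmem, -⟩
            rcases List.mem_append.mp hmem with h | h
            · exact hdr h
            · exact hdn h
          rw [if_pos ⟨hq, h1⟩, if_pos ⟨h1, hbn⟩]
          have hrw : dedupF ((r ++ (next ++ [d])).filter (fun x => !vis'.contains x))
              = dedupF ((r ++ next).filter (fun x => !vis'.contains x)) ++ [d] := by
            rw [← List.append_assoc, List.filter_append (r ++ next)]
            have : [d].filter (fun x => !vis'.contains x) = [d] := by simp [hdv]
            rw [this, dedupF_append_not_mem]
            simp only [List.mem_filter, List.mem_append]
            rintro ⟨hmem, -⟩
            rcases hmem with h | h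
            · exact hdr h
            · exact hdn h
          rw [← hrw] at *
          exact ih (next ++ [d])

theorem foldB_length (vis' : List Int) : ∀ (viz next : List Int),
    (viz.foldl
      (fun acc d => if ¬ vis'.contains d ∧ ¬ acc.contains d then acc ++ [d] else acc)
      next).length ≤ next.length + viz.length := by
  intro viz
  induction viz with
  | nil => intro next; simp
  | cons d viz ih =>
    intro next
    simp only [List.foldl_cons]
    split_ifs with h
    · calc ((viz.foldl _ (next ++ [d])).length) ≤ (next ++ [d]).length + viz.length := ih _
        _ ≤ next.length + (d :: viz).length := by simp; omega
    · calc ((viz.foldl _ next).length) ≤ next.length + viz.length := ih _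
        _ ≤ next.length + (d :: viz).length := by simp

theorem foldB_subset (vis' : List Int) (x : Int) : ∀ (viz next : List Int),
    x ∈ viz.foldl
      (fun acc d => if ¬ vis'.contains d ∧ ¬ acc.contains d then acc ++ [d] else acc)
      next → x ∈ next ∨ x ∈ viz := by
  intro viz
  induction viz with
  | nil => intro next h; exact Or.inl h
  | cons d viz ih =>
    intro next h
    simp only [List.foldl_cons] at h
    split_ifs at h with hc
    · rcases ih _ h with h' | h'
      · rcases List.mem_append.mp h' with h'' | h''
        · exact Or.inl h''
        · exact Or.inr (by simp [List.mem_singleton.mp h''])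
      · exact Or.inr (List.mem_cons.mpr (Or.inr h'))
    · rcases ih _ h with h' | h'
      · exact Or.inl h'
      · exact Or.inr (List.mem_cons.mpr (Or.inr h'))

-- key lemma: A's queue is always dedupF (unvisited part of B's rest ++ next)
theorem loopA_eq_loopB (vertices : List Int) (arestas : List (Int × Int)) (S : List Int)
    (hS : ∀ p ∈ arestas, p.2 ∈ S) :
    ∀ (fB : Nat) (rest next vis : List Int) (fA : Nat),
      (∀ x ∈ rest ++ next, x ∈ S) →
      unvis S vis ≤ fA →
      rest.length + next.length + (arestas.length + 1) * unvis S vis ≤ fB →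
      loopA vertices arestas fA (dedupF ((rest ++ next).filter (fun x => !vis.contains x))) vis
        = loopB (buildAdjB vertices arestas) fB rest next vis := by
  intro fB
  induction fB with
  | zero =>
    intro rest next vis fA hsub hA hB
    have hr : rest = [] := List.eq_nil_of_length_eq_zero (by omega)
    have hn : next = [] := List.eq_nil_of_length_eq_zero (by omega)
    subst hr; subst hn
    cases fA <;> simp [loopA, loopB, dedupF]
  | succ f ih =>
    have step : ∀ (v : Int) (r next vis : List Int) (fA : Nat),
        (∀ x ∈ (v :: r) ++ next, x ∈ S) →
        unvis S vis ≤ fA →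
        (v :: r).length + next.length + (arestas.length + 1) * unvis S vis ≤ f + 1 →
        loopA vertices arestas fA (dedupF (((v :: r) ++ next).filter (fun x => !vis.contains x))) vis
          = loopB (buildAdjB vertices arestas) (f + 1) (v :: r) next vis := by
      intro v r next vis fA hsub hA hB
      by_cases hv : vis.contains v = true
      · -- already visited: B skips, A's queue never contained this copy
        have hv' : v ∈ vis := by simpa using hv
        have hfilter : ((v :: r) ++ next).filter (fun x => !vis.contains x)
            = (r ++ next).filter (fun x => !vis.contains x) := by
          simp [hv', List.filter_append]
        rw [loopB, if_pos hv, hfilter]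
        exact ih r next vis fA (fun x hx => hsub x (by simp at hx ⊢; tauto)) hA (by simp at hB ⊢; omega)
      · -- unvisited: A pops and visits v, B visits v and extends the next frontier
        have hvS : v ∈ S := hsub v (by simp)
        have hu1 : unvis S (vis ++ [v]) + 1 = unvis S vis :=
          unvis_decrease S vis v hvS (by simpa using hv)
        obtain ⟨fA', rfl⟩ : ∃ k, fA = k + 1 := ⟨fA - 1, by omega⟩
        have hcons : dedupF (((v :: r) ++ next).filter (fun x => !vis.contains x))
            = v :: dedupF ((r ++ next).filter (fun x => !(vis ++ [v]).contains x)) := by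
          have h1 : ((v :: r) ++ next).filter (fun x => !vis.contains x)
              = v :: (r ++ next).filter (fun x => !vis.contains x) := by
            have hv' : v ∉ vis := by simpa using hv
            simp [hv', List.filter_append]
          rw [h1, dedupF, ← filter_contains_append]
        rw [hcons, loopA, if_neg hv, loopB, if_neg hv]
        simp only []
        have hviz : (buildAdjB vertices arestas).getD v [] = vizinhosA vertices arestas v :=
          getD_buildAdjB vertices arestas v
        rw [hviz, fold_step (vis ++ [v]) r (vizinhosA vertices arestas v) next]
        have hvizS : ∀ x ∈ vizinhosA vertices arestas v, x ∈ S := by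
          intro x hx
          unfold vizinhosA at hx
          split at hx
          · simp at hx
          · rcases List.mem_map.mp hx with ⟨p, hp, rfl⟩
            exact hS p (List.mem_of_mem_filter hp)
        have hvizlen : (vizinhosA vertices arestas v).length ≤ arestas.length := by
          unfold vizinhosA
          split
          · simp
          · simpa using List.length_filter_le _ arestas
        set next' := (vizinhosA vertices arestas v).foldl
          (fun acc d => if ¬ ((vis ++ [v]).contains d = true) ∧ ¬ (acc.contains d = true)
            then acc ++ [d] else acc) next with hnext'
        have hsub' : ∀ x ∈ r ++ next', x ∈ S := by
          intro x hx
          rcases List.mem_append.mp hx with h | h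
          · exact hsub x (by simp [h])
          · rcases foldB_subset (vis ++ [v]) x (vizinhosA vertices arestas v) next h with h' | h'
            · exact hsub x (by simp [h'])
            · exact hvizS x h'
        have hA' : unvis S (vis ++ [v]) ≤ fA' := by omega
        have hlen' : next'.length ≤ next.length + arestas.length :=
          le_trans (foldB_length (vis ++ [v]) (vizinhosA vertices arestas v) next)
            (by omega)
        have hB' : r.length + next'.length + (arestas.length + 1) * unvis S (vis ++ [v]) ≤ f := by
          have key : (arestas.length + 1) * unvis S vis
              = (arestas.length + 1) * unvis S (vis ++ [v]) + (arestas.length + 1) := by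
            rw [← hu1, Nat.mul_succ]
          rw [key] at hB
          obtain ⟨K, hK⟩ : ∃ k, k = (arestas.length + 1) * unvis S (vis ++ [v]) := ⟨_, rfl⟩
          rw [← hK] at hB ⊢
          simp at hB
          omega
        exact ih r next' (vis ++ [v]) fA' hsub' hA' hB'
    intro rest next vis fA hsub hA hB
    match rest, next with
    | [], [] =>
      cases fA <;> simp [loopA, loopB, dedupF]
    | [], nv :: t =>
      rw [loopB]
      have h0 : (([] : List Int) ++ nv :: t) = ((nv :: t) ++ ([] : List Int)) := by simp
      rw [h0]
      exact step nv t [] vis fA (fun x hx => hsub x (by simpa using hx)) hA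
        (by simp at hB ⊢; omega)
    | v :: r, next =>
      exact step v r next vis fA hsub hA hB

-- ===== VERDICT (by name: the statement is the Claim_ definition above) =====
theorem caminho_all_vertices_spec : Claim_equal_caminho_all_vertices := by
  intro vertices arestas _
  unfold Spec_caminho_all_vertices caminho_all_vertices caminho_all_vertices_alt
  match vertices with
  | [] => rfl
  | v0 :: vs =>
    have hS : ∀ p ∈ arestas, p.2 ∈ v0 :: arestas.map Prod.snd := by
      intro p hp
      exact List.mem_cons.mpr (Or.inr (List.mem_map_of_mem hp))
    have hu0 : unvis (v0 :: arestas.map Prod.snd) [] ≤ arestas.length + 1 := by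
      unfold unvis
      calc ((dedupF (v0 :: arestas.map Prod.snd)).filter _).length
          ≤ (dedupF (v0 :: arestas.map Prod.snd)).length := List.length_filter_le _ _
        _ ≤ (v0 :: arestas.map Prod.snd).length := length_dedupF_le _
        _ = arestas.length + 1 := by simp
    have hmul : (arestas.length + 1) * unvis (v0 :: arestas.map Prod.snd) []
        ≤ (arestas.length + 1) * (arestas.length + 1) :=
      Nat.mul_le_mul_left _ hu0
    have hinit : dedupF ((([v0] : List Int) ++ []).filter (fun x => !([] : List Int).contains x))
        = [v0] := by
      simp [dedupF]
    have := loopA_eq_loopB (v0 :: vs) arestas (v0 :: arestas.map Prod.snd) hS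
      ((arestas.length + 1) * (arestas.length + 1) + (v0 :: vs).length + 1)
      [v0] [] []
      (arestas.length + (v0 :: vs).length + 1)
      (by intro x hx; simp at hx; simp [hx])
      (by simp only [List.length_cons]; omega)
      (by simp only [List.length_cons, List.length_nil]; omega)
    rw [hinit] at this
    exact this
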